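-- pv_equiv track=rewrite | github.com/SanderOostdijk/Thesis_CoSEM | general_procedures.py | demand_equals_supply
-- ===== SOURCE A (Python) =====
-- def demand_equals_supply(demand_dict):
-- # Initialize a dictionary to hold the sums of each key
--     sums = {}
--
-- # Iterate through each inner dictionary and add values to the corresponding key in the `sums` dictionary
--     for timestep, demand in demand_dict.items():
--         sums[timestep] = 0
--         for value in demand.values():
--             sums[timestep] += value
--
-- # Check if all sums are zero
--     all_zero = all(total == 0 for total in sums.values())
-- # Return true if all the sums are zero, otherwise return false
--     return all_zero
-- ===== SOURCE B (Python) =====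
-- def demand_equals_supply(demand_dict):
--     # Single scalar running total over the flattened stream of demand values,
--     # checked at each timestep boundary with an early return: the running total
--     # is zero at every boundary iff every timestep's block sums to zero.
--     # No per-timestep sum() call and no intermediate sums table.
--     running = 0
--     for demand in demand_dict.values():
--         for value in demand.values():
--             running += value
--         if running:
--             return False
--     return True
-- ===== Notes on version B (the rewrite author's own statement) =====
-- stated objective: simpler
-- what changed: Replaces A's two phases (build a per-timestep sums dict, then scan all its entries) by a single scalar running total over the flattened value stream, checked at each timestep boundary with an early return; correct because the running total is zero at every boundary iff each block sums to zero.
import Mathlib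
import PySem

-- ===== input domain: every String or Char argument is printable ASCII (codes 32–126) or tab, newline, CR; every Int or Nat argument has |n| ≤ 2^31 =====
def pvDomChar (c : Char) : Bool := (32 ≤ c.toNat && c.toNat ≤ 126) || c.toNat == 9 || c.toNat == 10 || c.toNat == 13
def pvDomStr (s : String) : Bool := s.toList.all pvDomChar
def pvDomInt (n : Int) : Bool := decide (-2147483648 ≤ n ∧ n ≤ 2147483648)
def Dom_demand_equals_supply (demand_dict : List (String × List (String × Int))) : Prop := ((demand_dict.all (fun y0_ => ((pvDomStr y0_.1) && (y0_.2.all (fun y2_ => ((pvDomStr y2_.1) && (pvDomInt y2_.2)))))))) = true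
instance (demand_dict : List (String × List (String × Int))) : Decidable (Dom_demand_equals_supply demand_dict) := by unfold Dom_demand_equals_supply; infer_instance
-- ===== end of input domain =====

-- B replaces A's two phases (accumulate a per-timestep sums table, then scan it) by a
-- single scalar running total over the flattened value stream, checked at each timestep
-- boundary with an early return (objective: simpler, no intermediate table).

-- ===== PORT A =====
def demand_equals_supply (demand_dict : List (String × List (String × Int))) : Bool :=
  -- sums = {}; for timestep, demand in demand_dict.items(): sums[timestep] = 0;
  --   for value in demand.values(): sums[timestep] += value
  let sums : PySem.Dict String Int :=
    demand_dict.foldl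
      (fun sums td =>
        (td.2.map Prod.snd).foldl
          (fun s v => s.insert td.1 (s.getD td.1 0 + v))
          (sums.insert td.1 0))
      PySem.Dict.empty
  -- all(total == 0 for total in sums.values())
  sums.values.all (fun total => total == 0)

-- ===== PORT B =====
-- running = 0; for demand in ...: for value in ...: running += value; if running: return False
-- early return modelled by the structural recursion pvAltGo on the timestep list
def pvAltGo (running : Int) : List (String × List (String × Int)) → Bool
  | [] => true
  | td :: rest =>
      let running' := (td.2.map Prod.snd).foldl (· + ·) running
      if running' ≠ 0 then false else pvAltGo running' rest

def demand_equals_supply_alt (demand_dict : List (String × List (String × Int))) : Bool :=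
  pvAltGo 0 demand_dict

-- ===== PRECONDITION & SPEC =====
-- Pre_ excludes association lists whose outer (timestep) keys repeat: duplicate keys
-- cannot occur in the Python dict A receives (a dict literal collapses them), and the
-- assoc-list reading of such inputs is ambiguous.
def Pre_demand_equals_supply (demand_dict : List (String × List (String × Int))) : Prop :=
  (demand_dict.map Prod.fst).Nodup
instance (demand_dict : List (String × List (String × Int))) : Decidable (Pre_demand_equals_supply demand_dict) := by unfold Pre_demand_equals_supply; infer_instance

def pvWitness_demand_equals_supply : (List (String × List (String × Int))) :=
  [("t", [("x", 2), ("y", -2)]), ("u", [])]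

def Spec_demand_equals_supply (demand_dict : List (String × List (String × Int))) (out : Bool) : Prop := out = demand_equals_supply_alt demand_dict
instance (demand_dict : List (String × List (String × Int))) (out : Bool) : Decidable (Spec_demand_equals_supply demand_dict out) := by unfold Spec_demand_equals_supply; infer_instance

-- ===== CLAIM (what is proved, stated in full; the proofs are below) =====
def Claim_equal_demand_equals_supply : Prop := ∀ (demand_dict : List (String × List (String × Int))), Dom_demand_equals_supply demand_dict → Pre_demand_equals_supply demand_dict → Spec_demand_equals_supply demand_dict (demand_equals_supply demand_dict)

-- ===== LEMMAS AND PROOFS =====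

-- The inner accumulation loop over one timestep's values just adds their sum at key t.
theorem pv_inner_fold (vs : List Int) (d : PySem.Dict String Int) (t : String) (c : Int) :
    vs.foldl (fun s v => s.insert t (s.getD t 0 + v)) (d.insert t c)
      = d.insert t (vs.foldl (· + ·) c) := by
  induction vs generalizing c with
  | nil => rfl
  | cons v vs ih =>
      simp only [List.foldl_cons, PySem.Dict.getD_insert_self,
        PySem.Dict.insert_insert_self]
      exact ih (c + v)

-- B's boundary-checked running total is true iff every block sums to zero.
theorem pv_go_eq (l : List (String × List (String × Int))) :
    pvAltGo 0 l = l.all (fun td => ((td.2.map Prod.snd).foldl (· + ·) 0) == 0) := by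
  induction l with
  | nil => rfl
  | cons td rest ih =>
      simp only [pvAltGo, List.all_cons]
      by_cases h : (td.2.map Prod.snd).foldl (· + ·) 0 = 0
      · simp [h, ih]
      · simp [h]

-- ===== VERDICT (by name: the statement is the Claim_ definition above) =====
theorem demand_equals_supply_spec : Claim_equal_demand_equals_supply := by
  intro l _ hnd
  unfold Spec_demand_equals_supply demand_equals_supply demand_equals_supply_alt
  rw [pv_go_eq]
  have hbody :
      (fun (sums : PySem.Dict String Int) (td : String × List (String × Int)) =>
        (td.2.map Prod.snd).foldl
          (fun s v => s.insert td.1 (s.getD td.1 0 + v))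
          (sums.insert td.1 0))
      = fun sums td => sums.insert td.1 ((td.2.map Prod.snd).foldl (· + ·) 0) := by
    funext s td
    exact pv_inner_fold (td.2.map Prod.snd) s td.1 0
  rw [hbody]
  have hitems :
      (List.foldl (fun (sums : PySem.Dict String Int) (td : String × List (String × Int)) =>
          sums.insert td.1 ((td.2.map Prod.snd).foldl (· + ·) 0)) PySem.Dict.empty l).items
        = PySem.Dict.empty.items
            ++ l.map (fun td => (td.1, (td.2.map Prod.snd).foldl (· + ·) 0)) :=
    PySem.Dict.items_foldl_insert_fresh (l := l) (k := fun td => td.1)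
      (v := fun td => (td.2.map Prod.snd).foldl (· + ·) 0) (d := PySem.Dict.empty)
      (by intro a _; exact PySem.Dict.contains_empty a.1) hnd
  simp only [PySem.Dict.values]
  rw [hitems]
  simp only [PySem.Dict.empty, List.nil_append, List.map_map,
    List.all_map, Function.comp_def]
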